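-- pv_equiv track=rewrite | github.com/wangfeng012316/pytorch | tools/actions_local_runner.py | grab_all_steps_after
-- ===== SOURCE A (Python) =====
-- from typing import List, Dict, Any, Optional
--
-- def grab_all_steps_after(last_step: str, job: Dict[str, Any]) -> List[Dict[str, Any]]:
--     relevant_steps = []
--
--     found = False
--     for step in job["steps"]:
--         if found:
--             relevant_steps.append(step)
--         if step["name"].lower().strip() == last_step.lower().strip():
--             found = True
--
--     return relevant_steps
-- ===== SOURCE B (Python) =====
-- from typing import List, Dict, Any
--
-- def grab_all_steps_after(last_step: str, job: Dict[str, Any]) -> List[Dict[str, Any]]: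
--     steps = job["steps"]
--     target = last_step.lower().strip()
--     for i, step in enumerate(steps):
--         if step["name"].lower().strip() == target:
--             return steps[i + 1:]
--     return []
-- ===== Notes on version B (the rewrite author's own statement) =====
-- stated objective: simpler
-- what changed: Replaces the boolean-flag accumulation loop with locate-the-first-match-then-slice: on the first step whose normalized name equals the target, return steps[i+1:] immediately; no accumulator and no flag.
import Mathlib
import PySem

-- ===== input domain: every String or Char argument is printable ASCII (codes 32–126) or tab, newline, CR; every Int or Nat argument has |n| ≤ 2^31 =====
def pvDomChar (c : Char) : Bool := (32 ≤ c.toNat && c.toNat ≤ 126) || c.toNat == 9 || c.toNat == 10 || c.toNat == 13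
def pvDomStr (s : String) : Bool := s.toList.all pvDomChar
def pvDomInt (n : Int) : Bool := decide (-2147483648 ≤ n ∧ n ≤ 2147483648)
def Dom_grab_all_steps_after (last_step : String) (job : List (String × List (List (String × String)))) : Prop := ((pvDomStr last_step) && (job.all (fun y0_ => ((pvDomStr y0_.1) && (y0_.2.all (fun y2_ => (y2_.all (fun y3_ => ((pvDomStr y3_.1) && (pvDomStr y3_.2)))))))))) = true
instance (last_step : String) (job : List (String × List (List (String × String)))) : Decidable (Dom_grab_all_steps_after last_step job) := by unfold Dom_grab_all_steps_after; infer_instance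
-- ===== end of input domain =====

-- B replaces A's boolean-flag accumulation with locate-the-first-match-then-slice (simpler decomposition, same O(n)).

-- ===== PORT A =====
-- shared normalization: s.lower().strip()
def pvNorm (s : String) : String := PySem.Str.strip (PySem.Str.lower s)
-- step["name"]; the getD "" default is unreachable under Pre_ (every step has a "name" key)
def pvStepName (step : List (String × String)) : String := (List.lookup "name" step).getD ""

def grab_all_steps_after (last_step : String) (job : List (String × List (List (String × String)))) : List (List (String × String)) :=
  -- job["steps"]; getD [] is unreachable under Pre_ (job has a "steps" key)
  let steps := (List.lookup "steps" job).getD []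
  -- found/relevant_steps flag-accumulator loop, transliterated as a foldl over (found, relevant_steps)
  (steps.foldl
    (fun (st : Bool × List (List (String × String))) step =>
      (if pvNorm (pvStepName step) == pvNorm last_step then true else st.1,
       if st.1 then st.2 ++ [step] else st.2))
    (false, [])).2

-- ===== PORT B =====
-- Source B's loop: return steps[i+1:] at the first normalized-name match, [] if none
def pvLocate (target : String) : List (List (String × String)) → List (List (String × String))
  | [] => []
  | s :: rest => if pvNorm (pvStepName s) == target then rest else pvLocate target rest

def grab_all_steps_after_alt (last_step : String) (job : List (String × List (List (String × String)))) : List (List (String × String)) :=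
  let steps := (List.lookup "steps" job).getD []
  pvLocate (pvNorm last_step) steps

-- ===== PRECONDITION & SPEC =====
-- Pre_ excludes exactly the inputs where Python A raises KeyError: job without a "steps" key,
-- or a step without a "name" key.
def Pre_grab_all_steps_after (last_step : String) (job : List (String × List (List (String × String)))) : Prop :=
  (List.lookup "steps" job).isSome = true ∧
  ∀ s ∈ (List.lookup "steps" job).getD [], (List.lookup "name" s).isSome = true
instance (last_step : String) (job : List (String × List (List (String × String)))) : Decidable (Pre_grab_all_steps_after last_step job) := by unfold Pre_grab_all_steps_after; infer_instance

def pvWitness_grab_all_steps_after : String × (List (String × List (List (String × String)))) :=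
  (" A ", [("steps", [[("name", "x")], [("name", "a")], [("run", "y"), ("name", "b")]])])

def Spec_grab_all_steps_after (last_step : String) (job : List (String × List (List (String × String)))) (out : List (List (String × String))) : Prop := out = grab_all_steps_after_alt last_step job
instance (last_step : String) (job : List (String × List (List (String × String)))) (out : List (List (String × String))) : Decidable (Spec_grab_all_steps_after last_step job out) := by unfold Spec_grab_all_steps_after; infer_instance

-- ===== CLAIM (what is proved, stated in full; the proofs are below) =====
def Claim_equal_grab_all_steps_after : Prop := ∀ (last_step : String) (job : List (String × List (List (String × String)))), Dom_grab_all_steps_after last_step job → Pre_grab_all_steps_after last_step job → Spec_grab_all_steps_after last_step job (grab_all_steps_after last_step job)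

-- ===== LEMMAS AND PROOFS =====
-- once found, A's loop appends every remaining step
theorem pv_fold_true (last_step : String) (steps : List (List (String × String)))
    (acc : List (List (String × String))) :
    (steps.foldl
      (fun (st : Bool × List (List (String × String))) step =>
        (if pvNorm (pvStepName step) == pvNorm last_step then true else st.1,
         if st.1 then st.2 ++ [step] else st.2))
      (true, acc)).2 = acc ++ steps := by
  induction steps generalizing acc with
  | nil => simp
  | cons s rest ih =>
    simp only [List.foldl_cons, ite_self]
    rw [ih]
    simp

-- before the match, A's loop keeps the accumulator; at the first match it flips the flag,
-- so the result is acc ++ (the rest of the list) — exactly B's pvLocate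
theorem pv_fold_false (last_step : String) (steps : List (List (String × String)))
    (acc : List (List (String × String))) :
    (steps.foldl
      (fun (st : Bool × List (List (String × String))) step =>
        (if pvNorm (pvStepName step) == pvNorm last_step then true else st.1,
         if st.1 then st.2 ++ [step] else st.2))
      (false, acc)).2 = acc ++ pvLocate (pvNorm last_step) steps := by
  induction steps generalizing acc with
  | nil => simp [pvLocate]
  | cons s rest ih =>
    simp only [List.foldl_cons, pvLocate]
    by_cases h : pvNorm (pvStepName s) == pvNorm last_step
    · simp only [if_pos h]
      rw [pv_fold_true]
      simp
    · simp only [if_neg h]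
      rw [ih]
      simp

-- ===== VERDICT (by name: the statement is the Claim_ definition above) =====
theorem grab_all_steps_after_spec : Claim_equal_grab_all_steps_after := by
  intro last_step job _ _
  unfold Spec_grab_all_steps_after grab_all_steps_after grab_all_steps_after_alt
  rw [pv_fold_false]
  simp
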